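-- pv_equiv track=rewrite | github.com/mmisz/mediaplayer | mediaplayer/init.py | compare_with_thumbnails
-- ===== SOURCE A (Python) =====
-- def compare_with_thumbnails(images, thumbnails):
--     thumbnails_clear = []
--     for thumbnail in thumbnails:
--         thumbnails_clear.append(thumbnail.split('.')[0])
--     for image in images:
--         image_clear = image.split('.')[0]
--         if image_clear not in thumbnails_clear:
--             return False
--     return True
-- ===== SOURCE B (Python) =====
-- def compare_with_thumbnails(images, thumbnails):
--     need = sorted({img.split('.')[0] for img in images})
--     have = sorted({t.split('.')[0] for t in thumbnails})
--     i = j = 0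
--     while i < len(need):
--         if j == len(have):
--             return False
--         if have[j] == need[i]:
--             i += 1
--         elif have[j] < need[i]:
--             j += 1
--         else:
--             return False
--     return True
-- ===== Notes on version B (the rewrite author's own statement) =====
-- stated objective: alternative
-- what changed: Replaces A's prefix-list build plus per-image linear membership scan by sorting the two deduplicated prefix sets and checking containment with a two-pointer merge walk.
import Mathlib
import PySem

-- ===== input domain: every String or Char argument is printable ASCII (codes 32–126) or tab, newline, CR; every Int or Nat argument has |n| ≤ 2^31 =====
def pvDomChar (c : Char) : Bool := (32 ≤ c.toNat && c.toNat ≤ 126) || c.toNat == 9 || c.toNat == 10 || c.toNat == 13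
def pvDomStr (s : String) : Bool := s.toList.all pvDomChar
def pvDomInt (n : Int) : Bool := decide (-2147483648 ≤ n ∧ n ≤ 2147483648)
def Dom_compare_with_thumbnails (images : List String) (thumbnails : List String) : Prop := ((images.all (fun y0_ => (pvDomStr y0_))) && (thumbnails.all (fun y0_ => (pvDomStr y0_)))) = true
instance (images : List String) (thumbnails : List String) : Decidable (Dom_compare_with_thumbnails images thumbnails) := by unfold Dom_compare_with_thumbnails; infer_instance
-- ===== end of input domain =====

-- B replaces A's prefix-list build + per-image linear membership scan by sorting the two
-- deduplicated prefix sets and checking containment with a two-pointer merge walk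
-- (objective: alternative algorithm, same observable result).

-- s.split('.')[0]; splitOn with a non-empty separator always returns a non-empty list,
-- so headD "" is exact for the Python index [0]
def pvPrefix (s : String) : String := ((PySem.Str.split? s ".").getD []).headD ""

-- ===== PORT A =====
-- the second loop of A, with its early return False
def cwtLoop (thumbnails_clear : List String) : List String → Bool
  | [] => true
  | image :: rest =>
      if thumbnails_clear.contains (pvPrefix image) then cwtLoop thumbnails_clear rest
      else false

def compare_with_thumbnails (images : List String) (thumbnails : List String) : Bool :=
  let thumbnails_clear := thumbnails.foldl (fun acc t => acc ++ [pvPrefix t]) []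
  cwtLoop thumbnails_clear images

-- ===== PORT B =====
-- Source B's while loop over the two sorted lists, need from index i, have from index j
def cwtMerge : List String → List String → Bool
  | [], _ => true
  | _ :: _, [] => false
  | n :: ns, h :: hs =>
      if h == n then cwtMerge ns (h :: hs)
      else if h < n then cwtMerge (n :: ns) hs
      else false
termination_by xs ys => xs.length + ys.length

def compare_with_thumbnails_alt (images : List String) (thumbnails : List String) : Bool :=
  let need := PySem.List.sorted (PySem.Set.ofList (images.map pvPrefix)) (fun x => x) false
  let have_ := PySem.List.sorted (PySem.Set.ofList (thumbnails.map pvPrefix)) (fun x => x) false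
  cwtMerge need have_

-- ===== PRECONDITION & SPEC =====
def Spec_compare_with_thumbnails (images : List String) (thumbnails : List String) (out : Bool) : Prop := out = compare_with_thumbnails_alt images thumbnails
instance (images : List String) (thumbnails : List String) (out : Bool) : Decidable (Spec_compare_with_thumbnails images thumbnails out) := by unfold Spec_compare_with_thumbnails; infer_instance

-- ===== CLAIM (what is proved, stated in full; the proofs are below) =====
def Claim_equal_compare_with_thumbnails : Prop := ∀ (images : List String) (thumbnails : List String), Dom_compare_with_thumbnails images thumbnails → Spec_compare_with_thumbnails images thumbnails (compare_with_thumbnails images thumbnails)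

-- ===== LEMMAS AND PROOFS =====
theorem cwt_foldl_eq_map (f : String → String) (l : List String) (acc : List String) :
    l.foldl (fun acc t => acc ++ [f t]) acc = acc ++ l.map f := by
  induction l generalizing acc with
  | nil => simp
  | cons x xs ih => simp [List.foldl, ih]

theorem cwtLoop_eq_true_iff (clear : List String) (images : List String) :
    cwtLoop clear images = true ↔ ∀ i ∈ images, pvPrefix i ∈ clear := by
  induction images with
  | nil => simp [cwtLoop]
  | cons x xs ih =>
      by_cases h : pvPrefix x ∈ clear
      · simp [cwtLoop, h, ih]
      · simp [cwtLoop, h]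

-- the merge walk over two strictly increasing lists decides sublist containment
theorem cwtMerge_eq_true_iff (need have_ : List String)
    (hn : need.Pairwise (· < ·)) (hh : have_.Pairwise (· < ·)) :
    cwtMerge need have_ = true ↔ ∀ x ∈ need, x ∈ have_ := by
  fun_induction cwtMerge need have_ with
  | case1 l => simp
  | case2 n ns =>
      constructor
      · intro h; simp at h
      · intro h; exact absurd (h n List.mem_cons_self) (List.not_mem_nil)
  | case3 n ns h hs heq ih =>
      rw [List.pairwise_cons] at hn
      have hne : h = n := by simpa using heq
      subst hne
      rw [ih hn.2 hh]
      constructor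
      · rintro hsub x hx
        rcases List.mem_cons.mp hx with rfl | hx2
        · exact List.mem_cons_self
        · exact hsub x hx2
      · intro hsub x hx
        exact hsub x (List.mem_cons_of_mem _ hx)
  | case4 n ns h hs heq hlt ih =>
      rw [List.pairwise_cons] at hh
      rw [ih hn hh.2]
      have hlt' : h < n := hlt
      constructor
      · intro hsub x hx
        exact List.mem_cons_of_mem _ (hsub x hx)
      · intro hsub x hx
        have hx' := hsub x hx
        rcases List.mem_cons.mp hx' with rfl | hx''
        · exfalso
          have hge : n ≤ x := by
            rcases List.mem_cons.mp hx with rfl | hx3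
            · exact le_refl _
            · exact le_of_lt ((List.pairwise_cons.mp hn).1 x hx3)
          exact absurd (lt_of_lt_of_le hlt' hge) (lt_irrefl x)
        · exact hx''
  | case5 n ns h hs heq hnlt =>
      rw [List.pairwise_cons] at hh
      have hne : ¬ h = n := by simpa using heq
      have hnh : n < h := by
        rcases lt_trichotomy h n with h1 | h1 | h1
        · exact absurd h1 hnlt
        · exact absurd h1 hne
        · exact h1
      constructor
      · intro hfalse; simp at hfalse
      · intro hsub
        have := hsub n List.mem_cons_self
        rcases List.mem_cons.mp this with rfl | hx
        · exact absurd hnh (lt_irrefl n)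
        · exact absurd (hh.1 n hx) (not_lt_of_gt hnh)

-- ===== VERDICT (by name: the statement is the Claim_ definition above) =====
theorem compare_with_thumbnails_spec : Claim_equal_compare_with_thumbnails := by
  intro images thumbnails _
  unfold Spec_compare_with_thumbnails compare_with_thumbnails compare_with_thumbnails_alt
  rw [Bool.eq_iff_iff, cwt_foldl_eq_map, List.nil_append, cwtLoop_eq_true_iff,
    cwtMerge_eq_true_iff _ _ (PySem.List.sorted_ofList_pairwise_lt _)
      (PySem.List.sorted_ofList_pairwise_lt _)]
  constructor
  · intro h x hx
    rw [PySem.List.mem_sorted, PySem.Set.mem_ofList] at hx ⊢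
    obtain ⟨i, hi, rfl⟩ := List.mem_map.mp hx
    exact h i hi
  · intro h i hi
    have := h (pvPrefix i) (by
      rw [PySem.List.mem_sorted, PySem.Set.mem_ofList]
      exact List.mem_map_of_mem hi)
    rw [PySem.List.mem_sorted, PySem.Set.mem_ofList] at this
    obtain ⟨t, ht, heq⟩ := List.mem_map.mp this
    exact heq ▸ List.mem_map_of_mem ht
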